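-- pv_equiv track=rewrite | github.com/Obertura777/Pybert | bot.py | get_sub_list
-- ===== SOURCE A (Python) =====
-- def get_sub_list(press_seq: 'str | list[str]', index: int) -> list:
--     """
--     Port of GetSubList (FUN_00466060).
--
--     C: undefined4 * __thiscall GetSubList(void *this, undefined4 *param_1, int param_2)
--       this    = press-sequence object:
--                   this[0]  = pointer to flat ushort token buffer (2 bytes/token)
--                   this[2]  = pointer to int index array:
--                                index_array[i]   = start offset of sub-list i
--                                index_array[i+1] = end offset (exclusive)
--                   this[3]  = count of sub-lists
--       param_1 = output TokenSeq (initialised to {0, 0xffffffff, 0, 0xffffffff})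
--       param_2 = 0-based index of the sub-list to extract
--
--     Extraction logic (decompile lines 25–36):
--       length = index_array[i+1] - index_array[i]
--       if length == 1:
--           data = buf[start]          # bare single token — no parens to strip
--           count = 1
--       else:
--           data = buf[start + 1]      # skip leading '('
--           count = length - 2         # skip trailing ')' too
--       FUN_00465940(param_1, data, count)   # init output TokenSeq from slice
--
--     FUN_00465940 = TokenSeq_InitFromBuffer: populates a TokenSeq struct from a
--     raw pointer + length.  In Python this is simply returning the token slice.
--
--     Python equivalent:
--       Tokenise press_seq, walk top-level parenthesised groups (and bare tokens),
--       return the inner tokens of the index-th group with outer parens stripped.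
--       Returns [] if index is out of range or press_seq is empty.
--
--     Called from BuildAndSendSUB as GetSubList(puVar31 + 10, apvStack_180, 1)
--     to extract the second top-level sub-expression from a proposal token seq.
--     """
--     tokens: list[str] = press_seq.split() if isinstance(press_seq, str) else list(press_seq)
--
--     # Collect top-level groups: each is either a '(…)' span or a bare token.
--     groups: list[tuple[int, int]] = []  # (start_idx, end_idx) inclusive in tokens
--     depth = 0
--     group_start: int | None = None
--
--     for i, tok in enumerate(tokens):
--         if tok == '(':
--             if depth == 0:
--                 group_start = i
--             depth += 1
--         elif tok == ')':
--             depth -= 1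
--             if depth == 0 and group_start is not None:
--                 groups.append((group_start, i))
--                 group_start = None
--         elif depth == 0:
--             # bare token at top level — single-token sub-list with no parens
--             groups.append((i, i))
--
--     if index < 0 or index >= len(groups):
--         return []
--
--     start, end = groups[index]
--     group_tokens = tokens[start:end + 1]
--     length = len(group_tokens)
--
--     if length == 1:
--         # single bare token — return as-is (mirrors iVar2 == 1 branch)
--         return group_tokens
--     else:
--         # strip outer '(' and ')' (mirrors iVar2 != 1 branch: skip first + last)
--         return group_tokens[1:-1]
-- ===== SOURCE B (Python) =====
-- def get_sub_list(press_seq: 'str | list[str]', index: int) -> list: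
--     """Single streaming pass: no span list, no slicing — accumulate the current
--     top-level group's inner tokens and return it the moment it is complete."""
--     tokens = press_seq.split() if isinstance(press_seq, str) else list(press_seq)
--     if index < 0:
--         return []
--     depth = 0
--     counter = 0          # index of the top-level group currently being formed
--     cur = None           # inner tokens of the open top-level '(...)' group
--     for tok in tokens:
--         if tok == '(':
--             if depth == 0:
--                 cur = []
--             elif cur is not None:
--                 cur.append(tok)
--             depth += 1
--         elif tok == ')':
--             depth -= 1
--             if depth == 0 and cur is not None:
--                 if counter == index:
--                     return cur
--                 counter += 1
--                 cur = None
--             elif cur is not None: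
--                 cur.append(tok)
--         elif depth == 0:
--             if counter == index:
--                 return [tok]
--             counter += 1
--         elif cur is not None:
--             cur.append(tok)
--     return []
-- ===== Notes on version B (the rewrite author's own statement) =====
-- stated objective: alternative
-- what changed: Replaces A's two-phase scheme (collect all top-level group index spans, then index and re-slice the token list with paren stripping) by a single streaming pass that accumulates the current top-level group's inner tokens directly and returns as soon as group number index completes, with no span list and no slicing.
import Mathlib
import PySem

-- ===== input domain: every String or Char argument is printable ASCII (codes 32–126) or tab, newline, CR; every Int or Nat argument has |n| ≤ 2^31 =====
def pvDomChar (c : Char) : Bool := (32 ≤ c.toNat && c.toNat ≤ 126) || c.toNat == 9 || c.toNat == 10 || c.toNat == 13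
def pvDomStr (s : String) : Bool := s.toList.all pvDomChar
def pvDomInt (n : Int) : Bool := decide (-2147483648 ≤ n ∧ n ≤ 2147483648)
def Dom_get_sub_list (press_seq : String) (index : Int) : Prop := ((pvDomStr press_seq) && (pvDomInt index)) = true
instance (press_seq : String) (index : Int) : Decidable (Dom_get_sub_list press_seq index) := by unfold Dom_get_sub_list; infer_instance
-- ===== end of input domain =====

-- B replaces A's collect-all-spans-then-slice scheme by one streaming pass that
-- accumulates the current top-level group and returns it as soon as it completes (objective: alternative).

-- ===== PORT A =====
-- one step of A's for-loop over enumerate(tokens); state = (groups, depth, group_start)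
def aStep (st : List (Int × Int) × Int × Option Int) (p : Int × String) :
    List (Int × Int) × Int × Option Int :=
  let groups := st.1
  let depth := st.2.1
  let gs := st.2.2
  if p.2 = "(" then
    (groups, depth + 1, if depth = 0 then some p.1 else gs)
  else if p.2 = ")" then
    let depth' := depth - 1
    if depth' = 0 then
      match gs with
      | some s => (groups ++ [(s, p.1)], depth', none)
      | none => (groups, depth', none)
    else (groups, depth', gs)
  else if depth = 0 then (groups ++ [(p.1, p.1)], depth, gs)
  else (groups, depth, gs)

def get_sub_list (press_seq : String) (index : Int) : List String :=
  let tokens := PySem.Str.split₀ press_seq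
  let st := (PySem.List.enumerate tokens 0).foldl aStep ([], 0, none)
  let groups := st.1
  if index < 0 ∨ (groups.length : Int) ≤ index then []
  else
    let g := PySem.List.pyGetD groups index ((0 : Int), (0 : Int))
    let group_tokens := PySem.List.slice tokens (some g.1) (some (g.2 + 1))
    if group_tokens.length = 1 then group_tokens
    else PySem.List.slice group_tokens (some 1) (some (-1))

-- ===== PORT B =====
-- Source B's for-loop with early return: depth, group counter, current group's inner tokens
def bLoop (index : Int) : List String → Int → Int → Option (List String) → List String
  | [], _, _, _ => []
  | t :: ts, depth, counter, cur =>
    if t = "(" then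
      if depth = 0 then bLoop index ts (depth + 1) counter (some [])
      else
        match cur with
        | some c => bLoop index ts (depth + 1) counter (some (c ++ [t]))
        | none => bLoop index ts (depth + 1) counter none
    else if t = ")" then
      let depth' := depth - 1
      if h : depth' = 0 ∧ cur.isSome then
        match cur, h.2 with
        | some c, _ => if counter = index then c else bLoop index ts depth' (counter + 1) none
      else
        match cur with
        | some c => bLoop index ts depth' counter (some (c ++ [t]))
        | none => bLoop index ts depth' counter none
    else if depth = 0 then
      if counter = index then [t] else bLoop index ts depth (counter + 1) cur
    else
      match cur with
      | some c => bLoop index ts depth counter (some (c ++ [t]))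
      | none => bLoop index ts depth counter none

def get_sub_list_alt (press_seq : String) (index : Int) : List String :=
  let tokens := PySem.Str.split₀ press_seq
  if index < 0 then [] else bLoop index tokens 0 0 none

-- ===== PRECONDITION & SPEC =====
def Spec_get_sub_list (press_seq : String) (index : Int) (out : List String) : Prop := out = get_sub_list_alt press_seq index
instance (press_seq : String) (index : Int) (out : List String) : Decidable (Spec_get_sub_list press_seq index out) := by unfold Spec_get_sub_list; infer_instance

-- ===== CLAIM (what is proved, stated in full; the proofs are below) =====
def Claim_equal_get_sub_list : Prop := ∀ (press_seq : String) (index : Int), Dom_get_sub_list press_seq index → Spec_get_sub_list press_seq index (get_sub_list press_seq index)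

-- ===== LEMMAS AND PROOFS =====

-- reference helper: list of processed top-level groups emitted by the scan of ts at `depth`,
-- `cur` = inner tokens of the currently open top-level paren group (if any)
def G : List String → Int → Option (List String) → List (List String)
  | [], _, _ => []
  | t :: ts, depth, cur =>
    if t = "(" then
      if depth = 0 then G ts (depth + 1) (some [])
      else G ts (depth + 1) (cur.map (· ++ [t]))
    else if t = ")" then
      if depth - 1 = 0 then
        match cur with
        | some c => c :: G ts (depth - 1) none
        | none => G ts (depth - 1) none
      else G ts (depth - 1) (cur.map (· ++ [t]))
    else if depth = 0 then [t] :: G ts depth cur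
    else G ts depth (cur.map (· ++ [t]))

theorem bLoop_eq_G (index : Int) (ts : List String) :
    ∀ (depth counter : Int) (cur : Option (List String)), counter ≤ index →
      bLoop index ts depth counter cur = (G ts depth cur).getD (index - counter).toNat [] := by
  induction ts with
  | nil => intro d c cur h; simp [bLoop, G]
  | cons t ts ih =>
    intro d counter cur h
    by_cases ht1 : t = "("
    · by_cases hd : d = 0
      · simp [bLoop, G, ht1, hd, ih _ _ _ h]
      · cases cur <;> simp [bLoop, G, ht1, hd, ih _ _ _ h]
    · by_cases ht2 : t = ")"
      · by_cases hd : d - 1 = 0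
        · cases cur with
          | none => simp [bLoop, G, ht2, hd, ih _ _ _ h]
          | some c =>
            by_cases hc : counter = index
            · simp [bLoop, G, ht2, hd, hc]
            · have h1 : counter + 1 ≤ index := by omega
              have h2 : (index - counter).toNat = (index - (counter + 1)).toNat + 1 := by omega
              simp [bLoop, G, ht2, hd, hc, ih _ _ _ h1, h2]
        · cases cur <;> simp [bLoop, G, ht2, hd, ih _ _ _ h]
      · by_cases hd : d = 0
        · by_cases hc : counter = index
          · have h2 : (index - counter).toNat = 0 := by omega
            simp [bLoop, G, ht1, ht2, hd, hc]
          · have h1 : counter + 1 ≤ index := by omega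
            have h2 : (index - counter).toNat = (index - (counter + 1)).toNat + 1 := by omega
            simp [bLoop, G, ht1, ht2, hd, hc, ih _ _ _ h1, h2]
        · cases cur <;> simp [bLoop, G, ht1, ht2, hd, ih _ _ _ h]

-- the value A's tail computes from a span (s, e)
def procSpan (tokens : List String) (g : Int × Int) : List String :=
  let group_tokens := PySem.List.slice tokens (some g.1) (some (g.2 + 1))
  if group_tokens.length = 1 then group_tokens
  else PySem.List.slice group_tokens (some 1) (some (-1))

-- invariant coupling A's (depth, group_start) at position n with B's accumulated group
def ScanInv (tokens : List String) (n : Nat) (depth : Int) (gs : Option Int)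
    (cur : Option (List String)) : Prop :=
  (depth ≤ 0 ∧ gs = none ∧ cur = none) ∨
  (1 ≤ depth ∧ ∃ (s : Nat) (c : List String), gs = some (s : Int) ∧ cur = some c ∧
    s < n ∧ tokens[s]? = some "(" ∧ (tokens.drop (s + 1)).take (n - (s + 1)) = c)

theorem slice_one_neg_one {α : Type} (x y : α) (mid : List α) :
    PySem.List.slice (x :: (mid ++ [y])) (some 1) (some (-1)) = mid := by
  simp [PySem.List.slice, PySem.List.clampIdx]
  have h : ¬ ((mid.length : Int) + 1 < 0) := by omega
  rw [if_neg h]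
  simp

theorem procSpan_paren (tokens : List String) (s n : Nat) (hs : s < n) (hn : n < tokens.length)
    (hsp : tokens[s]? = some "(") (hnp : tokens[n]? = some ")") :
    procSpan tokens ((s : Int), (n : Int)) = (tokens.drop (s + 1)).take (n - (s + 1)) := by
  have hgt : PySem.List.slice tokens (some (s : Int)) (some ((n : Int) + 1))
      = "(" :: ((tokens.drop (s + 1)).take (n - (s + 1)) ++ [")"]) := by
    have hcast : (n : Int) + 1 = ((n + 1 : Nat) : Int) := by push_cast; ring
    rw [hcast, PySem.List.slice_natCast]
    have hdrop : tokens.drop s = tokens[s] :: tokens.drop (s + 1) :=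
      List.drop_eq_getElem_cons (by omega)
    rw [hdrop]
    have h1 : n + 1 - s = (n - (s + 1)) + 1 + 1 := by omega
    rw [h1, List.take_succ_cons]
    have hsv : tokens[s] = "(" := by
      simpa [List.getElem?_eq_getElem (show s < tokens.length by omega)] using hsp
    rw [hsv]
    congr 1
    rw [List.take_add_one]
    congr 1
    rw [List.getElem?_drop]
    have h2 : s + 1 + (n - (s + 1)) = n := by omega
    rw [h2, hnp]
    rfl
  unfold procSpan
  rw [hgt]
  have hlen : ("(" :: ((tokens.drop (s + 1)).take (n - (s + 1)) ++ [")"])).length ≠ 1 := by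
    simp
  rw [if_neg hlen, slice_one_neg_one]

theorem procSpan_bare (tokens : List String) (n : Nat) (t : String)
    (hnt : tokens[n]? = some t) :
    procSpan tokens ((n : Int), (n : Int)) = [t] := by
  have hgt : PySem.List.slice tokens (some (n : Int)) (some ((n : Int) + 1)) = [t] := by
    have hcast : (n : Int) + 1 = ((n + 1 : Nat) : Int) := by push_cast; ring
    rw [hcast, PySem.List.slice_natCast]
    have h2 : n + 1 - n = 1 := by omega
    rw [h2, List.take_one, List.head?_drop, hnt]
    rfl
  unfold procSpan
  rw [hgt]
  rfl

theorem take_extend (tokens : List String) (s n : Nat) (t : String) (c : List String)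
    (hs : s + 1 ≤ n) (hnt : tokens[n]? = some t)
    (hc : (tokens.drop (s + 1)).take (n - (s + 1)) = c) :
    (tokens.drop (s + 1)).take (n + 1 - (s + 1)) = c ++ [t] := by
  have h1 : n + 1 - (s + 1) = (n - (s + 1)) + 1 := by omega
  rw [h1, List.take_add_one, hc]
  congr 1
  rw [List.getElem?_drop]
  have h2 : s + 1 + (n - (s + 1)) = n := by omega
  rw [h2, hnt]
  rfl

theorem foldl_aStep_eq_G (tokens : List String) : ∀ (rest : List String) (n : Nat)
    (acc : List (Int × Int)) (depth : Int) (gs : Option Int) (cur : Option (List String)),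
    rest = tokens.drop n → ScanInv tokens n depth gs cur →
    ((PySem.List.enumerate rest (n : Int)).foldl aStep (acc, depth, gs)).1.map (procSpan tokens)
      = acc.map (procSpan tokens) ++ G rest depth cur := by
  intro rest
  induction rest with
  | nil => intro n acc depth gs cur _ _; simp [PySem.List.enumerate_nil, G]
  | cons t ts ih =>
    intro n acc depth gs cur hrest hinv
    have hnt : tokens[n]? = some t := by
      rw [← List.head?_drop, ← hrest]; rfl
    have hts : ts = tokens.drop (n + 1) := by
      rw [← List.tail_drop, ← hrest]; rfl
    have hnl : n < tokens.length := List.getElem?_eq_some_iff.mp hnt |>.1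
    rw [PySem.List.enumerate_cons, List.foldl_cons]
    have hcast : (n : Int) + 1 = ((n + 1 : Nat) : Int) := by push_cast; ring
    by_cases ht1 : t = "("
    · by_cases hd : depth = 0
      · -- open a new top-level group
        rcases hinv with ⟨_, hgs, hcur⟩ | ⟨hdep, _⟩
        · subst hgs hcur
          have hstep : aStep (acc, depth, none) ((n : Int), t) = (acc, depth + 1, some (n : Int)) := by
            simp [aStep, ht1, hd]
          rw [hstep, hcast,
            ih (n + 1) acc (depth + 1) (some (n : Int)) (some []) hts
              (Or.inr ⟨by omega, n, [], rfl, rfl, by omega, by rwa [ht1] at hnt, by simp⟩)]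
          simp [G, ht1, hd]
        · omega
      · rcases hinv with ⟨hdep, hgs, hcur⟩ | ⟨hdep, s, c, hgs, hcur, hsn, hsp, hct⟩
        · -- negative depth: nothing tracked
          subst hgs hcur
          have hstep : aStep (acc, depth, none) ((n : Int), t) = (acc, depth + 1, none) := by
            simp [aStep, ht1, hd]
          rw [hstep, hcast,
            ih (n + 1) acc (depth + 1) none none hts (Or.inl ⟨by omega, rfl, rfl⟩)]
          simp [G, ht1, hd]
        · -- inside a group: '(' becomes part of it
          subst hgs hcur
          have hstep : aStep (acc, depth, some (s : Int)) ((n : Int), t)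
              = (acc, depth + 1, some (s : Int)) := by
            simp [aStep, ht1, hd]
          rw [hstep, hcast,
            ih (n + 1) acc (depth + 1) (some (s : Int)) (some (c ++ [t])) hts
              (Or.inr ⟨by omega, s, c ++ [t], rfl, rfl, by omega, hsp,
                take_extend tokens s n t c (by omega) hnt hct⟩)]
          simp [G, ht1, hd]
    · by_cases ht2 : t = ")"
      · rcases hinv with ⟨hdep, hgs, hcur⟩ | ⟨hdep, s, c, hgs, hcur, hsn, hsp, hct⟩
        · -- stray ')': depth goes (further) negative
          subst hgs hcur
          have hd0 : ¬ (depth - 1 = 0) := by omega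
          have hstep : aStep (acc, depth, none) ((n : Int), t) = (acc, depth - 1, none) := by
            simp [aStep, ht2, hd0]
          rw [hstep, hcast,
            ih (n + 1) acc (depth - 1) none none hts (Or.inl ⟨by omega, rfl, rfl⟩)]
          simp [G, ht2, hd0]
        · subst hgs hcur
          by_cases hd0 : depth - 1 = 0
          · -- the group closes here
            have hstep : aStep (acc, depth, some (s : Int)) ((n : Int), t)
                = (acc ++ [((s : Int), (n : Int))], depth - 1, none) := by
              simp [aStep, ht2, hd0]
            rw [hstep, hcast,
              ih (n + 1) (acc ++ [((s : Int), (n : Int))]) (depth - 1) none none hts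
                (Or.inl ⟨by omega, rfl, rfl⟩)]
            have hps : procSpan tokens ((s : Int), (n : Int)) = c := by
              rw [procSpan_paren tokens s n hsn hnl hsp (by rwa [ht2] at hnt)]
              exact hct
            simp [G, ht2, hd0, hps]
          · -- ')' inside a deeper nesting: part of the group
            have hstep : aStep (acc, depth, some (s : Int)) ((n : Int), t)
                = (acc, depth - 1, some (s : Int)) := by
              simp [aStep, ht2, hd0]
            rw [hstep, hcast,
              ih (n + 1) acc (depth - 1) (some (s : Int)) (some (c ++ [t])) hts
                (Or.inr ⟨by omega, s, c ++ [t], rfl, rfl, by omega, hsp,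
                  take_extend tokens s n t c (by omega) hnt hct⟩)]
            simp [G, ht2, hd0]
      · by_cases hd : depth = 0
        · -- bare top-level token
          rcases hinv with ⟨_, hgs, hcur⟩ | ⟨hdep, _⟩
          · subst hgs hcur
            have hstep : aStep (acc, depth, none) ((n : Int), t)
                = (acc ++ [((n : Int), (n : Int))], depth, none) := by
              simp [aStep, ht1, ht2, hd]
            rw [hstep, hcast,
              ih (n + 1) (acc ++ [((n : Int), (n : Int))]) depth none none hts
                (Or.inl ⟨by omega, rfl, rfl⟩)]
            simp [G, ht1, ht2, hd, procSpan_bare tokens n t hnt]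
          · omega
        · rcases hinv with ⟨hdep, hgs, hcur⟩ | ⟨hdep, s, c, hgs, hcur, hsn, hsp, hct⟩
          · subst hgs hcur
            have hstep : aStep (acc, depth, none) ((n : Int), t) = (acc, depth, none) := by
              simp [aStep, ht1, ht2, hd]
            rw [hstep, hcast,
              ih (n + 1) acc depth none none hts (Or.inl ⟨by omega, rfl, rfl⟩)]
            simp [G, ht1, ht2, hd]
          · subst hgs hcur
            have hstep : aStep (acc, depth, some (s : Int)) ((n : Int), t)
                = (acc, depth, some (s : Int)) := by
              simp [aStep, ht1, ht2, hd]
            rw [hstep, hcast,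
              ih (n + 1) acc depth (some (s : Int)) (some (c ++ [t])) hts
                (Or.inr ⟨by omega, s, c ++ [t], rfl, rfl, by omega, hsp,
                  take_extend tokens s n t c (by omega) hnt hct⟩)]
            simp [G, ht1, ht2, hd]

theorem G_main (tokens : List String) :
    ((PySem.List.enumerate tokens 0).foldl aStep ([], 0, none)).1.map (procSpan tokens)
      = G tokens 0 none := by
  have h := foldl_aStep_eq_G tokens tokens 0 [] 0 none none (by simp)
    (Or.inl ⟨le_refl 0, rfl, rfl⟩)
  simpa using h

-- ===== VERDICT (by name: the statement is the Claim_ definition above) =====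
theorem get_sub_list_spec : Claim_equal_get_sub_list := by
  intro press_seq index _
  unfold Spec_get_sub_list get_sub_list get_sub_list_alt
  by_cases hneg : index < 0
  · simp [hneg]
  · push_neg at hneg
    rw [if_neg (by omega : ¬ index < 0)]
    have hB : bLoop index (PySem.Str.split₀ press_seq) 0 0 none
        = (G (PySem.Str.split₀ press_seq) 0 none).getD (index - 0).toNat [] :=
      bLoop_eq_G index (PySem.Str.split₀ press_seq) 0 0 none hneg
    rw [hB]
    set tokens := PySem.Str.split₀ press_seq with htok
    set groups := ((PySem.List.enumerate tokens 0).foldl aStep ([], 0, none)).1 with hgrp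
    have hG : groups.map (procSpan tokens) = G tokens 0 none := G_main tokens
    have hlen : (G tokens 0 none).length = groups.length := by
      rw [← hG]; simp
    by_cases hout : (groups.length : Int) ≤ index
    · rw [if_pos (Or.inr hout)]
      have h1 : (G tokens 0 none).length ≤ (index - 0).toNat := by omega
      rw [List.getD_eq_default _ _ h1]
    · rw [if_neg (by omega : ¬ (index < 0 ∨ (groups.length : Int) ≤ index))]
      have hidx : index.toNat < groups.length := by omega
      rw [PySem.List.pyGetD_eq_getElem groups ((0 : Int), (0 : Int)) hneg (by omega)]
      have h2 : (G tokens 0 none).getD (index - 0).toNat []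
          = procSpan tokens groups[index.toNat] := by
        rw [← hG, List.getD_eq_getElem?_getD, List.getElem?_map]
        have h3 : (index - 0).toNat = index.toNat := by omega
        rw [h3, List.getElem?_eq_getElem hidx]
        rfl
      rw [h2]
      rfl
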